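-- pv_equiv track=rewrite | github.com/lolvansh/internship_hunt | database/database.py | get_best_email
-- ===== SOURCE A (Python) =====
-- def get_best_email(email_list):
--     if not email_list: return None
--     emails = [e.strip().lower() for e in email_list]
--
--     # Priority Logic
--     for kw in ['hr@', 'career', 'job', 'talent', 'intern']:
--         for e in emails:
--             if kw in e: return e
--     for kw in ['info@', 'hello@', 'contact@']:
--         for e in emails:
--             if kw in e: return e
--     return emails[0]
-- ===== SOURCE B (Python) =====
-- _KEYWORDS = ['hr@', 'career', 'job', 'talent', 'intern', 'info@', 'hello@', 'contact@']
--
-- def _rank(e):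
--     for i, kw in enumerate(_KEYWORDS):
--         if kw in e:
--             return i
--     return len(_KEYWORDS)
--
-- def get_best_email(email_list):
--     if not email_list:
--         return None
--     best = email_list[0].strip().lower()
--     best_rank = len(_KEYWORDS)
--     for raw in email_list:
--         e = raw.strip().lower()
--         r = _rank(e)
--         if r < best_rank:
--             best, best_rank = e, r
--     return best
-- ===== Notes on version B (the rewrite author's own statement) =====
-- stated objective: simpler
-- what changed: Replaced the two keyword-tier nested loops over the email list by one flattened priority list and a single pass that keeps the running best email by minimal keyword rank (strict improvement preserves the first-in-list tie-break).
import Mathlib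
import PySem

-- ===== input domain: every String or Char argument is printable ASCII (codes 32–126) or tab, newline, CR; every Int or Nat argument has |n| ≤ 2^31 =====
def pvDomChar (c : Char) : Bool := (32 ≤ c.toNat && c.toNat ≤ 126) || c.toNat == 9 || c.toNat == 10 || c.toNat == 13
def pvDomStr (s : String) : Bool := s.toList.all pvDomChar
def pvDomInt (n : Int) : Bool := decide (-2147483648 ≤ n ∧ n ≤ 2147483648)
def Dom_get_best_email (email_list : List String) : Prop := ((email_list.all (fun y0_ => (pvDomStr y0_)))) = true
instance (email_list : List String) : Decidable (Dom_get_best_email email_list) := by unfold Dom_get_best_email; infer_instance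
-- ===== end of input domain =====

-- B replaces A's two keyword-tier nested loops by one flattened priority list and a single
-- pass keeping the running minimal-rank email (objective: simpler decomposition, same cost).

-- e.strip().lower(), shared normalization helper of both ports
def pvNorm (e : String) : String := PySem.Str.lower (PySem.Str.strip e)

-- ===== PORT A =====
def get_best_email (email_list : List String) : Option String :=
  if email_list = [] then none
  else
    let emails := email_list.map pvNorm
    match (["hr@", "career", "job", "talent", "intern"] : List String).findSome?
        (fun kw => emails.find? (fun e => PySem.Str.isIn kw e)) with
    | some e => some e
    | none =>
      match (["info@", "hello@", "contact@"] : List String).findSome?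
          (fun kw => emails.find? (fun e => PySem.Str.isIn kw e)) with
      | some e => some e
      | none => emails.head?   -- emails[0]: safe, the list is nonempty here

-- ===== PORT B =====
def pvKws : List String := ["hr@", "career", "job", "talent", "intern", "info@", "hello@", "contact@"]

-- port of _rank: first index of a keyword contained in e, else len(_KEYWORDS)
def bRank (e : String) : Nat :=
  match pvKws.findIdx? (fun kw => PySem.Str.isIn kw e) with
  | some i => i
  | none => pvKws.length

def get_best_email_alt (email_list : List String) : Option String :=
  match email_list with
  | [] => none
  | e0 :: _ =>
    let best := email_list.foldl
      (fun (b : String × Nat) raw =>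
        let e := pvNorm raw
        let r := bRank e
        if r < b.2 then (e, r) else b)
      (pvNorm e0, pvKws.length)
    some best.1

-- ===== PRECONDITION & SPEC =====
def Spec_get_best_email (email_list : List String) (out : Option String) : Prop := out = get_best_email_alt email_list
instance (email_list : List String) (out : Option String) : Decidable (Spec_get_best_email email_list out) := by unfold Spec_get_best_email; infer_instance

-- ===== CLAIM (what is proved, stated in full; the proofs are below) =====
def Claim_equal_get_best_email : Prop := ∀ (email_list : List String), Dom_get_best_email email_list → Spec_get_best_email email_list (get_best_email email_list)

-- ===== LEMMAS AND PROOFS =====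

-- rank relative to an arbitrary keyword list (generalizes bRank for the induction)
def rnk (kws : List String) (e : String) : Nat :=
  (kws.findIdx? (fun kw => PySem.Str.isIn kw e)).getD kws.length

theorem bRank_eq_rnk (e : String) : bRank e = rnk pvKws e := by
  unfold bRank rnk
  cases h : pvKws.findIdx? (fun kw => PySem.Str.isIn kw e) <;> rfl

theorem rnk_cons (kw : String) (rest : List String) (e : String) :
    rnk (kw :: rest) e = if PySem.Str.isIn kw e then 0 else rnk rest e + 1 := by
  unfold rnk
  rw [List.findIdx?_cons]
  by_cases h : PySem.Str.isIn kw e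
  · rw [if_pos h, if_pos h]; rfl
  · rw [if_neg h, if_neg h]
    cases h2 : rest.findIdx? (fun kw => PySem.Str.isIn kw e) <;> rfl

theorem foldr_min_min (l : List Nat) (a b : Nat) :
    l.foldr min (min a b) = min a (l.foldr min b) := by
  induction l with
  | nil => rfl
  | cons x l ih => simp only [List.foldr_cons, ih, min_left_comm]

theorem foldr_min_le (l : List Nat) (a : Nat) : l.foldr min a ≤ a := by
  induction l with
  | nil => exact le_rfl
  | cons x l ih => exact le_trans (min_le_right _ _) ih

theorem foldr_min_le_mem (l : List Nat) (a x : Nat) (hx : x ∈ l) : l.foldr min a ≤ x := by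
  induction l with
  | nil => cases hx
  | cons y l ih =>
    rcases List.mem_cons.mp hx with h | h
    · subst h; exact min_le_left _ _
    · exact le_trans (min_le_right _ _) (ih h)

theorem foldr_min_attained (l : List Nat) (a : Nat) :
    l.foldr min a = a ∨ l.foldr min a ∈ l := by
  induction l with
  | nil => exact Or.inl rfl
  | cons x l ih =>
    rcases le_total x (l.foldr min a) with h | h
    · right; simp [List.foldr_cons, min_eq_left h]
    · rw [List.foldr_cons, min_eq_right h]
      rcases ih with h1 | h1
      · exact Or.inl h1
      · exact Or.inr (List.mem_cons_of_mem _ h1)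

theorem find?_congr_mem {α : Type} (l : List α) (p q : α → Bool)
    (h : ∀ x ∈ l, p x = q x) : l.find? p = l.find? q := by
  induction l with
  | nil => rfl
  | cons x l ih =>
    rw [List.find?_cons, List.find?_cons, h x (List.mem_cons_self)]
    cases q x
    · exact ih (fun y hy => h y (List.mem_cons_of_mem _ hy))
    · rfl

theorem foldr_min_map_succ (l : List Nat) (a : Nat) :
    (l.map (· + 1)).foldr min (a + 1) = l.foldr min a + 1 := by
  induction l with
  | nil => rfl
  | cons x l ih => simp [List.foldr_cons, ih, Nat.succ_min_succ]

-- A's nested early-return loops, characterized as: first email of minimal rank (if any match)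
theorem A_char (kws : List String) : ∀ (emails : List String),
    kws.findSome? (fun kw => emails.find? (fun e => PySem.Str.isIn kw e)) =
      if (emails.map (rnk kws)).foldr min kws.length < kws.length
      then emails.find? (fun e => rnk kws e == (emails.map (rnk kws)).foldr min kws.length)
      else none := by
  induction kws with
  | nil => intro emails; simp
  | cons kw rest ih =>
    intro emails
    rw [List.findSome?_cons]
    cases hf : emails.find? (fun e => PySem.Str.isIn kw e) with
    | some e0 =>
      have he0 : PySem.Str.isIn kw e0 = true := List.find?_some hf
      have hmem : e0 ∈ emails := List.mem_of_find?_eq_some hf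
      have hr0 : rnk (kw :: rest) e0 = 0 := by rw [rnk_cons, if_pos he0]
      have h0mem : (0 : Nat) ∈ emails.map (rnk (kw :: rest)) := by
        exact List.mem_map.mpr ⟨e0, hmem, hr0⟩
      have hm0 : (emails.map (rnk (kw :: rest))).foldr min (kw :: rest).length = 0 :=
        Nat.le_zero.mp (foldr_min_le_mem _ _ _ h0mem)
      rw [hm0]
      have hcond : 0 < (kw :: rest).length := by simp
      rw [if_pos hcond]
      rw [find?_congr_mem emails _ (fun e => PySem.Str.isIn kw e)
        (by
          intro e _
          show (rnk (kw :: rest) e == 0) = PySem.Str.isIn kw e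
          rw [rnk_cons]
          cases h : PySem.Str.isIn kw e <;> simp)]
      rw [hf]
    | none =>
      have hall : ∀ e ∈ emails, PySem.Str.isIn kw e = false := by
        intro e he
        cases h : PySem.Str.isIn kw e
        · rfl
        · exact absurd h (List.find?_eq_none.mp hf e he)
      have hmap : emails.map (rnk (kw :: rest)) = (emails.map (rnk rest)).map (· + 1) := by
        rw [List.map_map]
        exact List.map_congr_left (by
          intro e he
          simp only [Function.comp]
          rw [rnk_cons, if_neg (by rw [hall e he]; simp)])
      have hlen : (kw :: rest).length = rest.length + 1 := rfl
      rw [hmap, hlen, foldr_min_map_succ]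
      by_cases hc : (emails.map (rnk rest)).foldr min rest.length < rest.length
      · rw [if_pos (by omega), ih emails, if_pos hc]
        exact find?_congr_mem emails _ _ (by
          intro e he
          rw [rnk_cons, if_neg (by rw [hall e he]; simp)]
          by_cases h : rnk rest e = (emails.map (rnk rest)).foldr min rest.length <;>
            simp [h])
      · rw [if_neg (by omega), ih emails, if_neg hc]

-- B's single-pass step over already-normalized emails
def stepB (b : String × Nat) (e : String) : String × Nat :=
  if bRank e < b.2 then (e, bRank e) else b

theorem fold_char : ∀ (xs : List String) (b : String) (r : Nat),
    xs.foldl stepB (b, r) =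
      ((if (xs.map bRank).foldr min r < r
          then ((xs.find? (fun e => bRank e == (xs.map bRank).foldr min r)).getD b)
          else b),
       (xs.map bRank).foldr min r) := by
  intro xs
  induction xs with
  | nil => intro b r; simp
  | cons x l ih =>
    intro b r
    rw [List.foldl_cons]
    by_cases hx : bRank x < r
    · have hstep : stepB (b, r) x = (x, bRank x) := by simp [stepB, hx]
      rw [hstep, ih x (bRank x)]
      have hm : (((x :: l).map bRank).foldr min r) = (l.map bRank).foldr min (bRank x) := by
        rw [List.map_cons, List.foldr_cons, ← foldr_min_min, min_eq_left (le_of_lt hx)]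
      set m2 := (l.map bRank).foldr min (bRank x) with hm2
      have hm2le : m2 ≤ bRank x := foldr_min_le _ _
      rw [hm]
      rw [if_pos (lt_of_le_of_lt hm2le hx)]
      by_cases hlt : m2 < bRank x
      · rw [if_pos hlt]
        have hne : (bRank x == m2) = false := by simp; omega
        rw [List.find?_cons, hne]
        have hmem : m2 ∈ l.map bRank := by
          rcases foldr_min_attained (l.map bRank) (bRank x) with h | h
          · omega
          · exact h
        obtain ⟨v, hv⟩ : ∃ v, l.find? (fun e => bRank e == m2) = some v := by
          have : (l.find? (fun e => bRank e == m2)).isSome = true := by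
            rcases List.mem_map.mp hmem with ⟨e, he, hre⟩
            exact List.find?_isSome.mpr ⟨e, he, by simp [hre]⟩
          exact Option.isSome_iff_exists.mp this
        rw [hv]
        rfl
      · have hx2 : m2 = bRank x := le_antisymm hm2le (not_lt.mp hlt)
        rw [if_neg hlt]
        rw [List.find?_cons]
        have : (bRank x == m2) = true := by simp [hx2]
        rw [this]
        rfl
    · have hstep : stepB (b, r) x = (b, r) := by simp [stepB, hx]
      rw [hstep, ih b r]
      have hm : (((x :: l).map bRank).foldr min r) = (l.map bRank).foldr min r := by
        simp only [List.map_cons, List.foldr_cons]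
        have : (l.map bRank).foldr min r ≤ bRank x :=
          le_trans (foldr_min_le _ _) (not_lt.mp hx)
        rw [min_eq_right this]
      set m' := (l.map bRank).foldr min r with hm'
      have hle : m' ≤ r := foldr_min_le _ _
      rw [hm]
      by_cases hc : m' < r
      · rw [if_pos hc, if_pos hc]
        rw [List.find?_cons]
        have : (bRank x == m') = false := by
          simp; omega
        rw [this]
      · rw [if_neg hc, if_neg hc]

theorem pvKws_split :
    pvKws = (["hr@", "career", "job", "talent", "intern"] : List String) ++
      (["info@", "hello@", "contact@"] : List String) := rfl

theorem rnk_pvKws_eq (e : String) : rnk pvKws e = bRank e := (bRank_eq_rnk e).symm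

-- ===== VERDICT (by name: the statement is the Claim_ definition above) =====
set_option maxHeartbeats 1000000 in
theorem get_best_email_spec : Claim_equal_get_best_email := by
  intro email_list _
  unfold Spec_get_best_email
  cases email_list with
  | nil => rfl
  | cons e0 tl =>
    have hB : get_best_email_alt (e0 :: tl) =
        some ((((e0 :: tl).map pvNorm).foldl stepB (pvNorm e0, pvKws.length)).1) := by
      simp only [get_best_email_alt]
      rw [List.foldl_map]
      rfl
    rw [hB, fold_char]
    simp only [get_best_email]
    rw [if_neg (show ¬(e0 :: tl = []) by simp)]
    set emails := (e0 :: tl).map pvNorm with hemails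
    have hA := A_char pvKws emails
    rw [show (emails.map (rnk pvKws)) = emails.map bRank from
      List.map_congr_left (fun e _ => rnk_pvKws_eq e)] at hA
    rw [find?_congr_mem emails _ (fun e => bRank e == (emails.map bRank).foldr min pvKws.length)
      (fun e _ => by rw [rnk_pvKws_eq])] at hA
    set m := (emails.map bRank).foldr min pvKws.length with hmdef
    have hmerge :
        pvKws.findSome? (fun kw => emails.find? (fun e => PySem.Str.isIn kw e)) =
        (((["hr@", "career", "job", "talent", "intern"] : List String).findSome?
            (fun kw => emails.find? (fun e => PySem.Str.isIn kw e))).or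
          ((["info@", "hello@", "contact@"] : List String).findSome?
            (fun kw => emails.find? (fun e => PySem.Str.isIn kw e)))) := by
      rw [pvKws_split, List.findSome?_append]
    have hhead : emails.head? = some (pvNorm e0) := rfl
    by_cases hc : m < pvKws.length
    · rw [if_pos hc] at hA ⊢
      have hmem : m ∈ emails.map bRank := by
        rcases foldr_min_attained (emails.map bRank) pvKws.length with h | h
        · rw [← hmdef] at h; omega
        · rw [← hmdef] at h; exact h
      obtain ⟨v, hv⟩ : ∃ v, emails.find? (fun e => bRank e == m) = some v := by
        have : (emails.find? (fun e => bRank e == m)).isSome = true := by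
          rcases List.mem_map.mp hmem with ⟨e, he, hre⟩
          exact List.find?_isSome.mpr ⟨e, he, by simp [hre]⟩
        exact Option.isSome_iff_exists.mp this
      have hFA := hA
      rw [hv, hmerge] at hFA
      rw [hv, Option.getD_some]
      rcases hsplit : (["hr@", "career", "job", "talent", "intern"] : List String).findSome?
          (fun kw => emails.find? (fun e => PySem.Str.isIn kw e)) with _ | w
      · rw [hsplit, Option.none_or] at hFA
        rw [hFA]
      · rw [hsplit, Option.some_or] at hFA
        rw [Option.some.injEq] at hFA
        rw [hFA]
    · rw [if_neg hc] at hA ⊢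
      have hFA := hA
      rw [hmerge] at hFA
      rcases hsplit : (["hr@", "career", "job", "talent", "intern"] : List String).findSome?
          (fun kw => emails.find? (fun e => PySem.Str.isIn kw e)) with _ | w
      · rw [hsplit, Option.none_or] at hFA
        rw [hFA]
        exact hhead
      · rw [hsplit, Option.some_or] at hFA
        exact absurd hFA (by simp)
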